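-- pv_equiv track=rewrite | github.com/HanFayeDD/leetcode | company/jd/p1.py | onegroup
-- ===== SOURCE A (Python) =====
-- import heapq
-- from typing import List
--
-- def onegroup(nums:List[int], k:int):
--     q = []
--     qdict = dict()
--     for i in range(1, len(nums)):
--         ele =  [-abs(nums[i]-nums[i-1]), i, nums[i]-nums[i-1]]
--         heapq.heappush(q, ele)
--         qdict[i] = ele
--
--     for i in range(k):
--         top = q[0]
--         absvalfirst = -top[0]
--         idx = top[1]
--         noabsval = top[2]
--         if noabsval > 0:
--             top[2] = noabsval - 1
--             top[0] = -abs(top[2])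
--             if idx-1 in qdict:
--                 update = qdict[idx-1]
--                 update[2] = update[2]+1
--                 update[0] = -abs(update[2])
--         elif noabsval < 0:
--             top[2] = noabsval + 1
--             top[0] = -abs(top[2])
--             if idx + 1 in qdict:
--                 update = qdict[idx+1]
--                 update[2] = update[2] - 1
--                 update[0] = -abs(update[2])
--         else:
--             break
--
--         heapq.heapify(q)
--
--         absvalafter = -q[0][0]
--         if absvalfirst < absvalafter:
--             return absvalfirst
--     return -q[0][0]
-- ===== SOURCE B (Python) =====
-- from typing import List
--
-- def onegroup(nums: List[int], k: int):
--     # Work directly on the list of successive differences; per round one linear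
--     # scan finds the (max-|diff|, smallest-index) element; no heap, no dict.
--     d = [b - a for a, b in zip(nums, nums[1:])]
--
--     def argmax():
--         bv = abs(d[0])
--         bj = 0
--         for j in range(1, len(d)):
--             if abs(d[j]) > bv:
--                 bv = abs(d[j])
--                 bj = j
--         return bv, bj
--
--     m, j = argmax()
--     for _ in range(k):
--         if d[j] == 0:
--             return 0
--         if d[j] > 0:
--             d[j] -= 1
--             if j > 0:
--                 d[j - 1] += 1
--         else:
--             d[j] += 1
--             if j + 1 < len(d):
--                 d[j + 1] -= 1
--         m2, j2 = argmax()
--         if m < m2: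
--             return m
--         m, j = m2, j2
--     return m
-- ===== Notes on version B (the rewrite author's own statement) =====
-- stated objective: simpler
-- what changed: Replaces the heap+dict of mutable triples re-heapified every round by a plain list of successive differences with one left-to-right max-|diff| scan per round (smallest index on ties), updating the chosen diff and its neighbour in place.
import Mathlib
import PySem

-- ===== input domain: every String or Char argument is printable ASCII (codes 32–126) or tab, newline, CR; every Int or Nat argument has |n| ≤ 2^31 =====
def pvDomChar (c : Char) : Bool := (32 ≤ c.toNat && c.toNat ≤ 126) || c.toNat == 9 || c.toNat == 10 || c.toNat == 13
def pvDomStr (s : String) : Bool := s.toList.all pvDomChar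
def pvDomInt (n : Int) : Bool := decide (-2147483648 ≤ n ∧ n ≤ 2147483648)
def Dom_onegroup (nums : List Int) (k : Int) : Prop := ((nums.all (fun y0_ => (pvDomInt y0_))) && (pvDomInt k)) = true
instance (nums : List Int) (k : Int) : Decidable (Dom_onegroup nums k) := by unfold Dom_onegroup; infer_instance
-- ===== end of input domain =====

-- B replaces A's heap+dict of shared mutable triples (re-heapified each round) by a plain
-- list of successive differences with one linear max-|diff| scan per round: simpler, and
-- A's in-place mutation of nothing the caller sees (q/qdict are local) — return value only.

-- ===== PORT A =====

-- Python compares the heap's 3-element lists lexicographically.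
def pvLt3 (a b : Int × Int × Int) : Bool :=
  decide (a.1 < b.1) ||
    (a.1 == b.1 && (decide (a.2.1 < b.2.1) || (a.2.1 == b.2.1 && decide (a.2.2 < b.2.2))))

-- A's heap cells are mutable list objects shared between q and qdict; a cell is modelled by
-- its unique key i (= its second component, never mutated) and its current value lives in
-- qdict — exactly Python's reference semantics for these aliased lists.
def pvVal (st : PySem.Dict Int (Int × Int × Int)) (i : Int) : Int × Int × Int :=
  (st.get? i).getD (0, 0, 0)

def pvMinKey (st : PySem.Dict Int (Int × Int × Int)) (h : Int) (t : List Int) : Int :=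
  t.foldl (fun m x => if pvLt3 (pvVal st x) (pvVal st m) then x else m) h

-- heapq.heapify is a stdlib call, ported by the specification A observes: afterwards q[0]
-- is the heap's minimum element (unique here: all cells differ in their second component),
-- and q still holds the same cells.  A never reads any other position of q.
def pvHeapify (st : PySem.Dict Int (Int × Int × Int)) (q : List Int) : List Int :=
  match q with
  | [] => []
  | h :: t => let m := pvMinKey st h t; m :: (h :: t).erase m

-- heapq.heappush, by the same observable specification (min at q[0], same cells).
def pvHeappush (st : PySem.Dict Int (Int × Int × Int)) (q : List Int) (i : Int) : List Int :=
  pvHeapify st (q ++ [i])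

-- the first for-loop of A: push [-abs(nums[i]-nums[i-1]), i, nums[i]-nums[i-1]] and store it
def pvInitA (nums : List Int) : PySem.Dict Int (Int × Int × Int) × List Int :=
  (PySem.List.pyRange 1 (nums.length : Int) 1).foldl
    (fun s i =>
      let dv := PySem.List.pyGetD nums i 0 - PySem.List.pyGetD nums (i - 1) 0
      let st := s.1.insert i (-|dv|, i, dv)   -- qdict[i] = ele (push and store share the object)
      (st, pvHeappush st s.2 i))
    (PySem.Dict.empty, [])

-- the second for-loop of A (fuel = number of remaining iterations of range(k))
def pvLoopA (st : PySem.Dict Int (Int × Int × Int)) (q : List Int) : Nat → Int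
  | 0 => -(pvVal st (q.headD 0)).1
  | fuel + 1 =>
    let top := pvVal st (q.headD 0)     -- q[0]; q ≠ [] under Pre_
    let absvalfirst := -top.1
    let idx := top.2.1
    let noabsval := top.2.2
    if noabsval > 0 then
      let st1 := st.insert idx (-|noabsval - 1|, idx, noabsval - 1)
      let st2 := if st1.contains (idx - 1) then
          let u := pvVal st1 (idx - 1)
          st1.insert (idx - 1) (-|u.2.2 + 1|, idx - 1, u.2.2 + 1)
        else st1
      let q1 := pvHeapify st2 q
      let absvalafter := -(pvVal st2 (q1.headD 0)).1
      if absvalfirst < absvalafter then absvalfirst else pvLoopA st2 q1 fuel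
    else if noabsval < 0 then
      let st1 := st.insert idx (-|noabsval + 1|, idx, noabsval + 1)
      let st2 := if st1.contains (idx + 1) then
          let u := pvVal st1 (idx + 1)
          st1.insert (idx + 1) (-|u.2.2 - 1|, idx + 1, u.2.2 - 1)
        else st1
      let q1 := pvHeapify st2 q
      let absvalafter := -(pvVal st2 (q1.headD 0)).1
      if absvalfirst < absvalafter then absvalfirst else pvLoopA st2 q1 fuel
    else -(pvVal st (q.headD 0)).1      -- break, then return -q[0][0]

def onegroup (nums : List Int) (k : Int) : Int :=
  let s := pvInitA nums
  pvLoopA s.1 s.2 k.toNat               -- range(k) runs max(k,0) times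

-- ===== PORT B =====

-- Source B's argmax() scan: bv = abs(d[0]); for j in range(1, len(d)): strict '>' keeps first max
def pvArgmaxAux : List Int → Int → Nat → Nat → Int × Nat
  | [], bv, bj, _ => (bv, bj)
  | y :: t, bv, bj, j => if |y| > bv then pvArgmaxAux t |y| j (j + 1) else pvArgmaxAux t bv bj (j + 1)

def pvArgmax (d : List Int) : Int × Nat :=
  match d with
  | [] => (0, 0)                        -- unreachable: Source B reads d[0]; Pre_ gives d ≠ []
  | x :: t => pvArgmaxAux t |x| 0 1

-- Source B's main loop; indices j, j±1 are always in range, so getD/set are exact for d[...]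
def pvLoopB (d : List Int) (m : Int) (j : Nat) : Nat → Int
  | 0 => m
  | fuel + 1 =>
    let dj := d.getD j 0
    if dj = 0 then 0
    else
      let d1 := if dj > 0 then
          let d' := d.set j (dj - 1)
          if 0 < j then d'.set (j - 1) (d'.getD (j - 1) 0 + 1) else d'
        else
          let d' := d.set j (dj + 1)
          if j + 1 < d.length then d'.set (j + 1) (d'.getD (j + 1) 0 - 1) else d'
      let r := pvArgmax d1
      if m < r.1 then m else pvLoopB d1 r.1 r.2 fuel

def onegroup_alt (nums : List Int) (k : Int) : Int :=
  let d := List.zipWith (fun a b => b - a) nums (nums.drop 1)   -- zip(nums, nums[1:])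
  let r := pvArgmax d
  pvLoopB d r.1 r.2 k.toNat

-- ===== PRECONDITION & SPEC =====
-- A reads q[0] of the heap built from adjacent pairs: with fewer than two elements the heap
-- is empty and A raises IndexError (for every k), so exactly those inputs are excluded.
def Pre_onegroup (nums : List Int) (k : Int) : Prop := 2 ≤ nums.length
instance (nums : List Int) (k : Int) : Decidable (Pre_onegroup nums k) := by unfold Pre_onegroup; infer_instance
def pvWitness_onegroup : List Int × Int := ([1, 3, 2], 2)

def Spec_onegroup (nums : List Int) (k : Int) (out : Int) : Prop := out = onegroup_alt nums k
instance (nums : List Int) (k : Int) (out : Int) : Decidable (Spec_onegroup nums k out) := by unfold Spec_onegroup; infer_instance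

-- ===== CLAIM (what is proved, stated in full; the proofs are below) =====
def Claim_equal_onegroup : Prop := ∀ (nums : List Int) (k : Int), Dom_onegroup nums k → Pre_onegroup nums k → Spec_onegroup nums k (onegroup nums k)

-- ===== LEMMAS AND PROOFS =====

-- the store/diff-list correspondence: st holds (-|d[i-1]|, i, d[i-1]) exactly at keys 1..len d
def pvWF (st : PySem.Dict Int (Int × Int × Int)) (d : List Int) : Prop :=
  ∀ i : Int, st.get? i =
    if 1 ≤ i ∧ i ≤ (d.length : Int) then
      some (-|d.getD (i - 1).toNat 0|, i, d.getD (i - 1).toNat 0)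
    else none

-- what Source B's scan computes: value and first position of the maximal |d[j]|
def pvIsArg (d : List Int) (m : Int) (j : Nat) : Prop :=
  j < d.length ∧ m = |d.getD j 0| ∧ (∀ x, x < d.length → |d.getD x 0| ≤ m) ∧ (∀ x, x < j → |d.getD x 0| < m)

theorem pvLt3_trans {a b c : Int × Int × Int} (h1 : pvLt3 a b) (h2 : pvLt3 b c) : pvLt3 a c := by
  obtain ⟨a1,a2,a3⟩ := a; obtain ⟨b1,b2,b3⟩ := b; obtain ⟨c1,c2,c3⟩ := c
  simp only [pvLt3, Bool.or_eq_true, Bool.and_eq_true, decide_eq_true_eq, beq_iff_eq] at *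
  omega

theorem pvLt3_total (a b : Int × Int × Int) : pvLt3 a b ∨ pvLt3 b a ∨ a = b := by
  obtain ⟨a1,a2,a3⟩ := a; obtain ⟨b1,b2,b3⟩ := b
  simp only [pvLt3, Bool.or_eq_true, Bool.and_eq_true, decide_eq_true_eq, beq_iff_eq, Prod.mk.injEq]
  omega

theorem pvLt3_irrefl (a : Int × Int × Int) : ¬ pvLt3 a a := by
  obtain ⟨a1,a2,a3⟩ := a
  simp only [pvLt3, Bool.or_eq_true, Bool.and_eq_true, decide_eq_true_eq, beq_iff_eq]
  omega

theorem pvLt3_nle_trans {a b c : Int × Int × Int}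
    (h1 : ¬ pvLt3 b a) (h2 : ¬ pvLt3 c b) : ¬ pvLt3 c a := by
  intro hca
  rcases pvLt3_total b c with h | h | h
  · exact h1 (pvLt3_trans h hca)
  · exact h2 h
  · subst h; exact h1 hca

theorem pvMinKey_spec (st : PySem.Dict Int (Int × Int × Int)) (t : List Int) : ∀ (a : Int),
    pvMinKey st a t ∈ a :: t ∧ ∀ x ∈ a :: t, ¬ pvLt3 (pvVal st x) (pvVal st (pvMinKey st a t)) := by
  induction t with
  | nil =>
    intro a
    refine ⟨by simp [pvMinKey], ?_⟩
    intro x hx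
    have hx' : x = a := by simpa using hx
    have hm : pvMinKey st a [] = a := rfl
    rw [hm, hx']
    exact pvLt3_irrefl _
  | cons y t' ih =>
    intro a
    by_cases hcmp : pvLt3 (pvVal st y) (pvVal st a)
    · have hstep : pvMinKey st a (y :: t') = pvMinKey st y t' := by simp [pvMinKey, hcmp]
      obtain ⟨hmem, hmin⟩ := ih y
      rw [hstep]
      refine ⟨?_, ?_⟩
      · rcases List.mem_cons.mp hmem with hm | hm
        · rw [hm]; simp
        · simp [hm]
      · intro x hx
        rcases List.mem_cons.mp hx with hxa | hx2
        · rw [hxa]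
          have hny := hmin y (by simp)
          intro hcon
          exact hny (pvLt3_trans hcmp hcon)
        · exact hmin x hx2
    · have hstep : pvMinKey st a (y :: t') = pvMinKey st a t' := by simp [pvMinKey, hcmp]
      obtain ⟨hmem, hmin⟩ := ih a
      rw [hstep]
      refine ⟨?_, ?_⟩
      · rcases List.mem_cons.mp hmem with hm | hm
        · rw [hm]; simp
        · simp [hm]
      · intro x hx
        rcases List.mem_cons.mp hx with hxa | hx2
        · rw [hxa]; exact hmin a (by simp)
        · rcases List.mem_cons.mp hx2 with hxy | hxt
          · rw [hxy]
            exact pvLt3_nle_trans (hmin a (by simp)) hcmp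
          · exact hmin x (by simp [hxt])

theorem pvArgmaxAux_spec (d : List Int) : ∀ (t : List Int) (bv : Int) (bj j : Nat),
    t = d.drop j → j ≤ d.length → bj < j → bv = |d.getD bj 0| →
    (∀ x, x < j → |d.getD x 0| ≤ bv) → (∀ x, x < bj → |d.getD x 0| < bv) →
    pvIsArg d (pvArgmaxAux t bv bj j).1 (pvArgmaxAux t bv bj j).2 := by
  intro t
  induction t with
  | nil =>
    intro bv bj j ht hj hbj hbv h4 h5
    have hlen : d.length ≤ j := by
      by_contra hc
      have := List.drop_eq_nil_iff.mp ht.symm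
      omega
    simp only [pvArgmaxAux]
    exact ⟨by omega, hbv, fun x hx => h4 x (by omega), h5⟩
  | cons y t' ih =>
    intro bv bj j ht hj hbj hbv h4 h5
    have hjlt : j < d.length := by
      by_contra hc
      have : d.drop j = [] := List.drop_eq_nil_iff.mpr (by omega)
      rw [this] at ht; exact (List.cons_ne_nil _ _) ht
    have hy : d.getD j 0 = y := by
      have h0 : d[j]? = some y := by
        have h1 : (d.drop j)[0]? = some y := by rw [← ht]; rfl
        simpa [List.getElem?_drop] using h1
      simp [List.getD, h0]
    have ht' : t' = d.drop (j + 1) := by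
      have h2 : List.drop 1 (List.drop j d) = List.drop (j + 1) d := List.drop_drop
      rw [← ht] at h2
      simpa using h2
    simp only [pvArgmaxAux]
    split_ifs with hcmp
    · exact ih |y| j (j + 1) ht' (by omega) (by omega) (by rw [hy])
        (fun x hx => by rcases Nat.lt_succ_iff_lt_or_eq.mp hx with h | h
                        · exact le_of_lt (lt_of_le_of_lt (h4 x h) hcmp)
                        · subst h; rw [hy])
        (fun x hx => by rcases Nat.lt_succ_iff_lt_or_eq.mp (Nat.lt_succ_of_lt hx) with _ | _ <;>
                          exact lt_of_le_of_lt (h4 x (by omega)) hcmp)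
    · exact ih bv bj (j + 1) ht' (by omega) (by omega) hbv
        (fun x hx => by rcases Nat.lt_succ_iff_lt_or_eq.mp hx with h | h
                        · exact h4 x h
                        · subst h; rw [hy]; omega)
        h5

theorem pvArgmax_spec (d : List Int) (hd : d ≠ []) : pvIsArg d (pvArgmax d).1 (pvArgmax d).2 := by
  match d, hd with
  | x :: t, _ =>
    have := pvArgmaxAux_spec (x :: t) t |x| 0 1 (by simp) (by simp) (by omega) (by simp)
      (fun y hy => by interval_cases y <;> simp) (fun y hy => by omega)
    simpa [pvArgmax] using this

theorem pvVal_of_wf (st : PySem.Dict Int (Int × Int × Int)) (d : List Int) (hwf : pvWF st d)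
    (i : Int) (h1 : 1 ≤ i) (h2 : i ≤ (d.length : Int)) :
    pvVal st i = (-|d.getD (i - 1).toNat 0|, i, d.getD (i - 1).toNat 0) := by
  simp [pvVal, hwf i, h1, h2]

theorem pvMin_eq_arg (st : PySem.Dict Int (Int × Int × Int)) (d : List Int) (q : List Int)
    (hwf : pvWF st d) (hperm : q.Perm (PySem.List.pyRange 1 ((d.length : Int) + 1) 1))
    (h : Int) (t : List Int) (hq : q = h :: t) (hd : d ≠ []) :
    pvMinKey st h t = ((pvArgmax d).2 : Int) + 1 := by
  obtain ⟨hj, hm, hle, hlt⟩ := pvArgmax_spec d hd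
  obtain ⟨hmem, hmin⟩ := pvMinKey_spec st t h
  set r := pvMinKey st h t with hr
  have hrk : r ∈ PySem.List.pyRange 1 ((d.length : Int) + 1) 1 := by
    rw [← hq] at hmem
    exact hperm.mem_iff.mp hmem
  have hrb := (PySem.List.mem_pyRange_one).mp hrk
  have hr1 : 1 ≤ r := hrb.1
  have hr2 : r ≤ (d.length : Int) := by omega
  have hjk : ((pvArgmax d).2 : Int) + 1 ∈ PySem.List.pyRange 1 ((d.length : Int) + 1) 1 := by
    rw [PySem.List.mem_pyRange_one]
    omega
  have hjq : ((pvArgmax d).2 : Int) + 1 ∈ h :: t := by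
    rw [← hq]; exact hperm.mem_iff.mpr hjk
  have hnlt := hmin _ hjq
  set n := (r - 1).toNat with hn
  have hrn : r = (n : Int) + 1 := by omega
  have hvr : pvVal st r = (-|d.getD n 0|, r, d.getD n 0) := pvVal_of_wf st d hwf r hr1 hr2
  have hvj : pvVal st (((pvArgmax d).2 : Int) + 1) =
      (-|d.getD (pvArgmax d).2 0|, ((pvArgmax d).2 : Int) + 1, d.getD (pvArgmax d).2 0) := by
    have := pvVal_of_wf st d hwf (((pvArgmax d).2 : Int) + 1) (by omega) (by omega)
    simpa using this
  rw [hvr, hvj] at hnlt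
  simp only [pvLt3, Bool.or_eq_true, Bool.and_eq_true, decide_eq_true_eq, beq_iff_eq] at hnlt
  push_neg at hnlt
  have hnlen : n < d.length := by omega
  have hA := hle n hnlen
  rw [← hm] at *
  by_cases hcase : n < (pvArgmax d).2
  · have := hlt n hcase
    omega
  · -- n ≥ j; from hnlt: ¬ (first comp <) gives |d n| ≥ m, then ¬ (j+1 < r)
    have h1 : ¬ (-(pvArgmax d).1 < -|d.getD n 0|) := by
      intro hcon
      exact absurd hcon (by simpa using hnlt.1)
    have heq : |d.getD n 0| = (pvArgmax d).1 := le_antisymm hA (by omega)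
    have h2 := hnlt.2 (by omega)
    omega

theorem pvHeapify_spec (st : PySem.Dict Int (Int × Int × Int)) (d : List Int) (q : List Int)
    (hwf : pvWF st d) (hperm : q.Perm (PySem.List.pyRange 1 ((d.length : Int) + 1) 1))
    (hd : d ≠ []) :
    (pvHeapify st q).Perm (PySem.List.pyRange 1 ((d.length : Int) + 1) 1) ∧
      (pvHeapify st q).headD 0 = ((pvArgmax d).2 : Int) + 1 := by
  have hlen : 1 ≤ d.length := List.length_pos_iff.mpr hd
  have hqne : q ≠ [] := by
    intro hc
    have h1 : (1 : Int) ∈ PySem.List.pyRange 1 ((d.length : Int) + 1) 1 := by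
      rw [PySem.List.mem_pyRange_one]; omega
    have := hperm.mem_iff.mpr h1
    rw [hc] at this; simp at this
  obtain ⟨h, t, hq⟩ := List.exists_cons_of_ne_nil hqne
  have hmin := pvMin_eq_arg st d q hwf hperm h t hq hd
  obtain ⟨hmem, _⟩ := pvMinKey_spec st t h
  have hh : pvHeapify st q = pvMinKey st h t :: q.erase (pvMinKey st h t) := by
    rw [hq]; simp [pvHeapify]
  constructor
  · rw [hh, hq]
    have hperm' : (h :: t).Perm (PySem.List.pyRange 1 ((d.length : Int) + 1) 1) := hq ▸ hperm
    exact ((List.perm_cons_erase hmem).symm).trans hperm'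
  · rw [hh]
    simp [hmin]

theorem pvWF_contains (st : PySem.Dict Int (Int × Int × Int)) (d : List Int) (hwf : pvWF st d)
    (i : Int) : st.contains i = decide (1 ≤ i ∧ i ≤ (d.length : Int)) := by
  rw [PySem.Dict.contains_eq_isSome_get?, hwf i]
  split_ifs with hc <;> simp [hc]

theorem pvGetD_set_eq (l : List Int) (i : Nat) (v : Int) (h : i < l.length) :
    (l.set i v).getD i 0 = v := by
  simp [List.getD_eq_getElem?_getD, List.getElem?_set, h]

theorem pvGetD_set_ne (l : List Int) (i jx : Nat) (v : Int) (h : i ≠ jx) :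
    (l.set i v).getD jx 0 = l.getD jx 0 := by
  simp [List.getD_eq_getElem?_getD, List.getElem?_set, h]

theorem pvWF_insert' (st : PySem.Dict Int (Int × Int × Int)) (d : List Int) (hwf : pvWF st d)
    (p : Nat) (hp : p < d.length) (key v : Int) (hkey : key = (p : Int) + 1) :
    pvWF (st.insert key (-|v|, key, v)) (d.set p v) := by
  subst hkey
  intro i
  rw [PySem.Dict.get?_insert]
  by_cases hip : i = (p : Int) + 1
  · subst hip
    have h1 : (1 ≤ (p : Int) + 1 ∧ (p : Int) + 1 ≤ ((d.set p v).length : Int)) := by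
      simp; omega
    rw [if_pos rfl, if_pos h1]
    have : (((p : Int) + 1) - 1).toNat = p := by omega
    rw [this, pvGetD_set_eq d p v hp]
  · rw [if_neg hip, hwf i]
    have hlen : (d.set p v).length = d.length := by simp
    by_cases hin : 1 ≤ i ∧ i ≤ (d.length : Int)
    · have hne : (i - 1).toNat ≠ p := by omega
      rw [if_pos hin, if_pos (by omega), pvGetD_set_ne d p (i - 1).toNat v (fun hc => hne hc.symm)]
    · rw [if_neg hin, if_neg (by rw [hlen]; exact hin)]

theorem pvWF_append' (st : PySem.Dict Int (Int × Int × Int)) (d : List Int) (hwf : pvWF st d)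
    (key v : Int) (hkey : key = (d.length : Int) + 1) :
    pvWF (st.insert key (-|v|, key, v)) (d ++ [v]) := by
  intro i
  rw [PySem.Dict.get?_insert]
  by_cases hik : i = key
  · have hkey' : i = (d.length : Int) + 1 := hik.trans hkey
    rw [if_pos hik, if_pos (by
      simp only [List.length_append, List.length_cons, List.length_nil]
      push_cast
      omega)]
    have h1 : ((i - 1).toNat) = d.length := by omega
    rw [h1]
    have h2 : (d ++ [v]).getD d.length 0 = v := by
      simp [List.getD_eq_getElem?_getD]
    rw [h2, hkey, hkey']
  · rw [if_neg hik, hwf i]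
    by_cases hin : 1 ≤ i ∧ i ≤ (d.length : Int)
    · have hlt : (i - 1).toNat < d.length := by omega
      rw [if_pos hin, if_pos (by
        simp only [List.length_append, List.length_cons, List.length_nil]
        push_cast
        omega)]
      have h3 : (d ++ [v]).getD (i - 1).toNat 0 = d.getD (i - 1).toNat 0 := by
        rw [List.getD_eq_getElem?_getD, List.getD_eq_getElem?_getD, List.getElem?_append_left hlt]
      rw [h3]
    · rw [if_neg hin, if_neg (by
        simp only [List.length_append, List.length_cons, List.length_nil]
        push_cast
        omega)]

theorem pvDiff_getD (nums : List Int) (t : Nat) (ht : t + 1 < nums.length) :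
    (List.zipWith (fun a b => b - a) nums (nums.drop 1)).getD t 0 =
      nums.getD (t + 1) 0 - nums.getD t 0 := by
  have hlen : (List.zipWith (fun a b => b - a) nums (nums.drop 1)).length = nums.length - 1 := by
    simp
  have htz : t < (List.zipWith (fun a b => b - a) nums (nums.drop 1)).length := by omega
  have htn : t < nums.length := by omega
  rw [List.getD_eq_getElem?_getD, List.getElem?_eq_getElem htz, List.getD_eq_getElem?_getD,
      List.getElem?_eq_getElem ht, List.getD_eq_getElem?_getD, List.getElem?_eq_getElem htn]
  simp only [List.getElem_zipWith, List.getElem_drop, Option.getD_some]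
  congr 2
  omega

theorem pvLoop_eq (fuel : Nat) : ∀ (st : PySem.Dict Int (Int × Int × Int)) (q d : List Int),
    pvWF st d → q.Perm (PySem.List.pyRange 1 ((d.length : Int) + 1) 1) → d ≠ [] →
    q.headD 0 = ((pvArgmax d).2 : Int) + 1 →
    pvLoopA st q fuel = pvLoopB d (pvArgmax d).1 (pvArgmax d).2 fuel := by
  induction fuel with
  | zero =>
    intro st q d hwf hperm hd hhead
    obtain ⟨hj, hm, hle, hlt⟩ := pvArgmax_spec d hd
    have hidx : ((((pvArgmax d).2 : Int) + 1) - 1).toNat = (pvArgmax d).2 := by omega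
    simp only [pvLoopA, pvLoopB]
    rw [hhead, pvVal_of_wf st d hwf _ (by omega) (by push_cast; omega), hidx]
    simp [hm]
  | succ fuel ih =>
    intro st q d hwf hperm hd hhead
    obtain ⟨hj, hm, hle, hlt⟩ := pvArgmax_spec d hd
    have hidx : ((((pvArgmax d).2 : Int) + 1) - 1).toNat = (pvArgmax d).2 := by omega
    have htop : pvVal st (q.headD 0) =
        (-|d.getD (pvArgmax d).2 0|, ((pvArgmax d).2 : Int) + 1, d.getD (pvArgmax d).2 0) := by
      rw [hhead, pvVal_of_wf st d hwf _ (by omega) (by push_cast; omega), hidx]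
    simp only [pvLoopA, pvLoopB, htop]
    by_cases hpos : d.getD (pvArgmax d).2 0 > 0
    · rw [if_pos hpos, if_neg (show ¬ (d.getD (pvArgmax d).2 0 = 0) by omega), if_pos hpos]
      have hwf1 : pvWF (st.insert (((pvArgmax d).2 : Int) + 1) (-|d.getD (pvArgmax d).2 0 - 1|, ((pvArgmax d).2 : Int) + 1, d.getD (pvArgmax d).2 0 - 1)) (d.set (pvArgmax d).2 (d.getD (pvArgmax d).2 0 - 1)) := pvWF_insert' st d hwf (pvArgmax d).2 hj _ _ rfl
      have hcont := pvWF_contains _ _ hwf1 (((pvArgmax d).2 : Int) + 1 - 1)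
      rw [hcont]
      by_cases hjpos : 0 < (pvArgmax d).2
      · rw [if_pos (show (decide (1 ≤ ((pvArgmax d).2 : Int) + 1 - 1 ∧ ((pvArgmax d).2 : Int) + 1 - 1 ≤
            (((d.set (pvArgmax d).2 (d.getD (pvArgmax d).2 0 - 1)).length : Int))) = true) from by
            rw [decide_eq_true_eq, List.length_set]
            omega), if_pos hjpos]
        have e2 : ((((pvArgmax d).2 : Int) + 1 - 1) - 1).toNat = (pvArgmax d).2 - 1 := by omega
        have hu22 : (pvVal (st.insert (((pvArgmax d).2 : Int) + 1) (-|d.getD (pvArgmax d).2 0 - 1|, ((pvArgmax d).2 : Int) + 1, d.getD (pvArgmax d).2 0 - 1)) (((pvArgmax d).2 : Int) + 1 - 1)).2.2 = (d.set (pvArgmax d).2 (d.getD (pvArgmax d).2 0 - 1)).getD ((pvArgmax d).2 - 1) 0 := by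
          rw [pvVal_of_wf _ _ hwf1 _ (by omega) (by simp only [List.length_set]; push_cast; omega), e2]
        rw [hu22]
        have hwf2' := pvWF_insert' (st.insert (((pvArgmax d).2 : Int) + 1) (-|d.getD (pvArgmax d).2 0 - 1|, ((pvArgmax d).2 : Int) + 1, d.getD (pvArgmax d).2 0 - 1)) (d.set (pvArgmax d).2 (d.getD (pvArgmax d).2 0 - 1)) hwf1 ((pvArgmax d).2 - 1)
          (by simp only [List.length_set]; omega) (((pvArgmax d).2 : Int) + 1 - 1) ((d.set (pvArgmax d).2 (d.getD (pvArgmax d).2 0 - 1)).getD ((pvArgmax d).2 - 1) 0 + 1) (by omega)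
        have hwf2 : pvWF ((st.insert (((pvArgmax d).2 : Int) + 1) (-|d.getD (pvArgmax d).2 0 - 1|, ((pvArgmax d).2 : Int) + 1, d.getD (pvArgmax d).2 0 - 1)).insert (((pvArgmax d).2 : Int) + 1 - 1) (-|((d.set (pvArgmax d).2 (d.getD (pvArgmax d).2 0 - 1)).getD ((pvArgmax d).2 - 1) 0 + 1)|, ((pvArgmax d).2 : Int) + 1 - 1, ((d.set (pvArgmax d).2 (d.getD (pvArgmax d).2 0 - 1)).getD ((pvArgmax d).2 - 1) 0 + 1))) ((d.set (pvArgmax d).2 (d.getD (pvArgmax d).2 0 - 1)).set ((pvArgmax d).2 - 1) ((d.set (pvArgmax d).2 (d.getD (pvArgmax d).2 0 - 1)).getD ((pvArgmax d).2 - 1) 0 + 1)) := hwf2'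
        have hlen1 : (((d.set (pvArgmax d).2 (d.getD (pvArgmax d).2 0 - 1)).set ((pvArgmax d).2 - 1) ((d.set (pvArgmax d).2 (d.getD (pvArgmax d).2 0 - 1)).getD ((pvArgmax d).2 - 1) 0 + 1))).length = d.length := by simp
        have hd1 : (((d.set (pvArgmax d).2 (d.getD (pvArgmax d).2 0 - 1)).set ((pvArgmax d).2 - 1) ((d.set (pvArgmax d).2 (d.getD (pvArgmax d).2 0 - 1)).getD ((pvArgmax d).2 - 1) 0 + 1))) ≠ [] := by
          intro hc
          have hcl : d.length = 0 := by rw [← hlen1, hc]; rfl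
          omega
        have hperm1 : q.Perm (PySem.List.pyRange 1 (((((d.set (pvArgmax d).2 (d.getD (pvArgmax d).2 0 - 1)).set ((pvArgmax d).2 - 1) ((d.set (pvArgmax d).2 (d.getD (pvArgmax d).2 0 - 1)).getD ((pvArgmax d).2 - 1) 0 + 1))).length : Int) + 1) 1) := by
          rw [hlen1]; exact hperm
        obtain ⟨hp1, hh1⟩ := pvHeapify_spec ((st.insert (((pvArgmax d).2 : Int) + 1) (-|d.getD (pvArgmax d).2 0 - 1|, ((pvArgmax d).2 : Int) + 1, d.getD (pvArgmax d).2 0 - 1)).insert (((pvArgmax d).2 : Int) + 1 - 1) (-|((d.set (pvArgmax d).2 (d.getD (pvArgmax d).2 0 - 1)).getD ((pvArgmax d).2 - 1) 0 + 1)|, ((pvArgmax d).2 : Int) + 1 - 1, ((d.set (pvArgmax d).2 (d.getD (pvArgmax d).2 0 - 1)).getD ((pvArgmax d).2 - 1) 0 + 1))) ((d.set (pvArgmax d).2 (d.getD (pvArgmax d).2 0 - 1)).set ((pvArgmax d).2 - 1) ((d.set (pvArgmax d).2 (d.getD (pvArgmax d).2 0 - 1)).getD ((pvArgmax d).2 -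 1) 0 + 1)) q hwf2 hperm1 hd1
        rw [hh1]
        obtain ⟨hj1, hm1, hle1, hlt1⟩ := pvArgmax_spec ((d.set (pvArgmax d).2 (d.getD (pvArgmax d).2 0 - 1)).set ((pvArgmax d).2 - 1) ((d.set (pvArgmax d).2 (d.getD (pvArgmax d).2 0 - 1)).getD ((pvArgmax d).2 - 1) 0 + 1)) hd1
        have hval2 : (pvVal ((st.insert (((pvArgmax d).2 : Int) + 1) (-|d.getD (pvArgmax d).2 0 - 1|, ((pvArgmax d).2 : Int) + 1, d.getD (pvArgmax d).2 0 - 1)).insert (((pvArgmax d).2 : Int) + 1 - 1) (-|((d.set (pvArgmax d).2 (d.getD (pvArgmax d).2 0 - 1)).getD ((pvArgmax d).2 - 1) 0 + 1)|, ((pvArgmax d).2 : Int) + 1 - 1, ((d.set (pvArgmax d).2 (d.getD (pvArgmax d).2 0 - 1)).getD ((pvArgmax d).2 - 1) 0 + 1))) (((pvArgmax ((d.set (pvArgmax d).2 (d.getD (pvArgmax d).2 0 - 1)).set ((pvArgmax d).2 - 1) ((d.set (pvArgmax d).2 (d.getD (pvArgmax d).2 0 - 1)).getD ((pvArgmax d).2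 - 1) 0 + 1))).2 : Int) + 1)).1 = -|(((d.set (pvArgmax d).2 (d.getD (pvArgmax d).2 0 - 1)).set ((pvArgmax d).2 - 1) ((d.set (pvArgmax d).2 (d.getD (pvArgmax d).2 0 - 1)).getD ((pvArgmax d).2 - 1) 0 + 1))).getD (pvArgmax ((d.set (pvArgmax d).2 (d.getD (pvArgmax d).2 0 - 1)).set ((pvArgmax d).2 - 1) ((d.set (pvArgmax d).2 (d.getD (pvArgmax d).2 0 - 1)).getD ((pvArgmax d).2 - 1) 0 + 1))).2 0| := by
          rw [pvVal_of_wf _ _ hwf2 _ (by omega) (by rw [hlen1]; push_cast; omega)]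
          have e3 : (((pvArgmax ((d.set (pvArgmax d).2 (d.getD (pvArgmax d).2 0 - 1)).set ((pvArgmax d).2 - 1) ((d.set (pvArgmax d).2 (d.getD (pvArgmax d).2 0 - 1)).getD ((pvArgmax d).2 - 1) 0 + 1))).2 : Int) + 1 - 1).toNat = (pvArgmax ((d.set (pvArgmax d).2 (d.getD (pvArgmax d).2 0 - 1)).set ((pvArgmax d).2 - 1) ((d.set (pvArgmax d).2 (d.getD (pvArgmax d).2 0 - 1)).getD ((pvArgmax d).2 - 1) 0 + 1))).2 := by omega
          rw [e3]
        rw [hval2, neg_neg, neg_neg, ← hm, ← hm1]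
        by_cases hcmp2 : (pvArgmax d).1 < (pvArgmax ((d.set (pvArgmax d).2 (d.getD (pvArgmax d).2 0 - 1)).set ((pvArgmax d).2 - 1) ((d.set (pvArgmax d).2 (d.getD (pvArgmax d).2 0 - 1)).getD ((pvArgmax d).2 - 1) 0 + 1))).1
        · rw [if_pos hcmp2, if_pos hcmp2]
        · rw [if_neg hcmp2, if_neg hcmp2]
          exact ih ((st.insert (((pvArgmax d).2 : Int) + 1) (-|d.getD (pvArgmax d).2 0 - 1|, ((pvArgmax d).2 : Int) + 1, d.getD (pvArgmax d).2 0 - 1)).insert (((pvArgmax d).2 : Int) + 1 - 1) (-|((d.set (pvArgmax d).2 (d.getD (pvArgmax d).2 0 - 1)).getD ((pvArgmax d).2 - 1) 0 + 1)|, ((pvArgmax d).2 : Int) + 1 - 1, ((d.set (pvArgmax d).2 (d.getD (pvArgmax d).2 0 - 1)).getD ((pvArgmax d).2 - 1) 0 + 1))) (pvHeapify ((st.insert (((pvArgmax d).2 : Int) + 1) (-|d.getD (pvArgmax d).2 0 - 1|, ((pvArgmax d).2 : Int) + 1, d.getD (pvArgmax d).2 0 - 1)).insert (((pvArgmax d).2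 : Int) + 1 - 1) (-|((d.set (pvArgmax d).2 (d.getD (pvArgmax d).2 0 - 1)).getD ((pvArgmax d).2 - 1) 0 + 1)|, ((pvArgmax d).2 : Int) + 1 - 1, ((d.set (pvArgmax d).2 (d.getD (pvArgmax d).2 0 - 1)).getD ((pvArgmax d).2 - 1) 0 + 1))) q) ((d.set (pvArgmax d).2 (d.getD (pvArgmax d).2 0 - 1)).set ((pvArgmax d).2 - 1) ((d.set (pvArgmax d).2 (d.getD (pvArgmax d).2 0 - 1)).getD ((pvArgmax d).2 - 1) 0 + 1)) hwf2 hp1 hd1 hh1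
      · rw [if_neg (show ¬ (decide (1 ≤ ((pvArgmax d).2 : Int) + 1 - 1 ∧ ((pvArgmax d).2 : Int) + 1 - 1 ≤
            (((d.set (pvArgmax d).2 (d.getD (pvArgmax d).2 0 - 1)).length : Int))) = true) from by
            rw [decide_eq_true_eq]
            omega), if_neg hjpos]
        have hwf2' : pvWF (st.insert (((pvArgmax d).2 : Int) + 1) (-|d.getD (pvArgmax d).2 0 - 1|, ((pvArgmax d).2 : Int) + 1, d.getD (pvArgmax d).2 0 - 1)) (d.set (pvArgmax d).2 (d.getD (pvArgmax d).2 0 - 1)) := hwf1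
        have hwf2 : pvWF (st.insert (((pvArgmax d).2 : Int) + 1) (-|d.getD (pvArgmax d).2 0 - 1|, ((pvArgmax d).2 : Int) + 1, d.getD (pvArgmax d).2 0 - 1)) (d.set (pvArgmax d).2 (d.getD (pvArgmax d).2 0 - 1)) := hwf2'
        have hlen1 : ((d.set (pvArgmax d).2 (d.getD (pvArgmax d).2 0 - 1))).length = d.length := by simp
        have hd1 : ((d.set (pvArgmax d).2 (d.getD (pvArgmax d).2 0 - 1))) ≠ [] := by
          intro hc
          have hcl : d.length = 0 := by rw [← hlen1, hc]; rfl
          omega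
        have hperm1 : q.Perm (PySem.List.pyRange 1 ((((d.set (pvArgmax d).2 (d.getD (pvArgmax d).2 0 - 1))).length : Int) + 1) 1) := by
          rw [hlen1]; exact hperm
        obtain ⟨hp1, hh1⟩ := pvHeapify_spec (st.insert (((pvArgmax d).2 : Int) + 1) (-|d.getD (pvArgmax d).2 0 - 1|, ((pvArgmax d).2 : Int) + 1, d.getD (pvArgmax d).2 0 - 1)) (d.set (pvArgmax d).2 (d.getD (pvArgmax d).2 0 - 1)) q hwf2 hperm1 hd1
        rw [hh1]
        obtain ⟨hj1, hm1, hle1, hlt1⟩ := pvArgmax_spec (d.set (pvArgmax d).2 (d.getD (pvArgmax d).2 0 - 1)) hd1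
        have hval2 : (pvVal (st.insert (((pvArgmax d).2 : Int) + 1) (-|d.getD (pvArgmax d).2 0 - 1|, ((pvArgmax d).2 : Int) + 1, d.getD (pvArgmax d).2 0 - 1)) (((pvArgmax (d.set (pvArgmax d).2 (d.getD (pvArgmax d).2 0 - 1))).2 : Int) + 1)).1 = -|((d.set (pvArgmax d).2 (d.getD (pvArgmax d).2 0 - 1))).getD (pvArgmax (d.set (pvArgmax d).2 (d.getD (pvArgmax d).2 0 - 1))).2 0| := by
          rw [pvVal_of_wf _ _ hwf2 _ (by omega) (by rw [hlen1]; push_cast; omega)]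
          have e3 : (((pvArgmax (d.set (pvArgmax d).2 (d.getD (pvArgmax d).2 0 - 1))).2 : Int) + 1 - 1).toNat = (pvArgmax (d.set (pvArgmax d).2 (d.getD (pvArgmax d).2 0 - 1))).2 := by omega
          rw [e3]
        rw [hval2, neg_neg, neg_neg, ← hm, ← hm1]
        by_cases hcmp2 : (pvArgmax d).1 < (pvArgmax (d.set (pvArgmax d).2 (d.getD (pvArgmax d).2 0 - 1))).1
        · rw [if_pos hcmp2, if_pos hcmp2]
        · rw [if_neg hcmp2, if_neg hcmp2]
          exact ih (st.insert (((pvArgmax d).2 : Int) + 1) (-|d.getD (pvArgmax d).2 0 - 1|, ((pvArgmax d).2 : Int) + 1, d.getD (pvArgmax d).2 0 - 1)) (pvHeapify (st.insert (((pvArgmax d).2 : Int) + 1) (-|d.getD (pvArgmax d).2 0 - 1|, ((pvArgmax d).2 : Int) + 1, d.getD (pvArgmax d).2 0 - 1)) q) (d.set (pvArgmax d).2 (d.getD (pvArgmax d).2 0 - 1)) hwf2 hp1 hd1 hh1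
    · by_cases hneg : d.getD (pvArgmax d).2 0 < 0
      · rw [if_neg hpos, if_pos hneg, if_neg (show ¬ (d.getD (pvArgmax d).2 0 = 0) by omega), if_neg hpos]
        have hwf1 : pvWF (st.insert (((pvArgmax d).2 : Int) + 1) (-|d.getD (pvArgmax d).2 0 + 1|, ((pvArgmax d).2 : Int) + 1, d.getD (pvArgmax d).2 0 + 1)) (d.set (pvArgmax d).2 (d.getD (pvArgmax d).2 0 + 1)) := pvWF_insert' st d hwf (pvArgmax d).2 hj _ _ rfl
        have hcont := pvWF_contains _ _ hwf1 (((pvArgmax d).2 : Int) + 1 + 1)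
        rw [hcont]
        by_cases hguard : (pvArgmax d).2 + 1 < d.length
        · rw [if_pos (show (decide (1 ≤ ((pvArgmax d).2 : Int) + 1 + 1 ∧ ((pvArgmax d).2 : Int) + 1 + 1 ≤
              (((d.set (pvArgmax d).2 (d.getD (pvArgmax d).2 0 + 1)).length : Int))) = true) from by
              rw [decide_eq_true_eq, List.length_set]
              push_cast
              omega), if_pos hguard]
          have e2 : ((((pvArgmax d).2 : Int) + 1 + 1) - 1).toNat = (pvArgmax d).2 + 1 := by omega
          have hu22 : (pvVal (st.insert (((pvArgmax d).2 : Int) + 1) (-|d.getD (pvArgmax d).2 0 + 1|, ((pvArgmax d).2 : Int) + 1, d.getD (pvArgmax d).2 0 + 1)) (((pvArgmax d).2 : Int) + 1 + 1)).2.2 = (d.set (pvArgmax d).2 (d.getD (pvArgmax d).2 0 + 1)).getD ((pvArgmax d).2 + 1) 0 := by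
            rw [pvVal_of_wf _ _ hwf1 _ (by omega) (by simp only [List.length_set]; push_cast; omega), e2]
          rw [hu22]
          have hwf2' := pvWF_insert' (st.insert (((pvArgmax d).2 : Int) + 1) (-|d.getD (pvArgmax d).2 0 + 1|, ((pvArgmax d).2 : Int) + 1, d.getD (pvArgmax d).2 0 + 1)) (d.set (pvArgmax d).2 (d.getD (pvArgmax d).2 0 + 1)) hwf1 ((pvArgmax d).2 + 1)
            (by simp only [List.length_set]; omega) (((pvArgmax d).2 : Int) + 1 + 1) ((d.set (pvArgmax d).2 (d.getD (pvArgmax d).2 0 + 1)).getD ((pvArgmax d).2 + 1) 0 - 1) (by push_cast; omega)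
          have hwf2 : pvWF ((st.insert (((pvArgmax d).2 : Int) + 1) (-|d.getD (pvArgmax d).2 0 + 1|, ((pvArgmax d).2 : Int) + 1, d.getD (pvArgmax d).2 0 + 1)).insert (((pvArgmax d).2 : Int) + 1 + 1) (-|((d.set (pvArgmax d).2 (d.getD (pvArgmax d).2 0 + 1)).getD ((pvArgmax d).2 + 1) 0 - 1)|, ((pvArgmax d).2 : Int) + 1 + 1, ((d.set (pvArgmax d).2 (d.getD (pvArgmax d).2 0 + 1)).getD ((pvArgmax d).2 + 1) 0 - 1))) ((d.set (pvArgmax d).2 (d.getD (pvArgmax d).2 0 + 1)).set ((pvArgmax d).2 + 1) ((d.set (pvArgmax d).2 (d.getD (pvArgmax d).2 0 + 1)).getD ((pvArgmax d).2 + 1) 0 - 1)) := hwf2'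
          have hlen1 : (((d.set (pvArgmax d).2 (d.getD (pvArgmax d).2 0 + 1)).set ((pvArgmax d).2 + 1) ((d.set (pvArgmax d).2 (d.getD (pvArgmax d).2 0 + 1)).getD ((pvArgmax d).2 + 1) 0 - 1))).length = d.length := by simp
          have hd1 : (((d.set (pvArgmax d).2 (d.getD (pvArgmax d).2 0 + 1)).set ((pvArgmax d).2 + 1) ((d.set (pvArgmax d).2 (d.getD (pvArgmax d).2 0 + 1)).getD ((pvArgmax d).2 + 1) 0 - 1))) ≠ [] := by
            intro hc
            have hcl : d.length = 0 := by rw [← hlen1, hc]; rfl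
            omega
          have hperm1 : q.Perm (PySem.List.pyRange 1 (((((d.set (pvArgmax d).2 (d.getD (pvArgmax d).2 0 + 1)).set ((pvArgmax d).2 + 1) ((d.set (pvArgmax d).2 (d.getD (pvArgmax d).2 0 + 1)).getD ((pvArgmax d).2 + 1) 0 - 1))).length : Int) + 1) 1) := by
            rw [hlen1]; exact hperm
          obtain ⟨hp1, hh1⟩ := pvHeapify_spec ((st.insert (((pvArgmax d).2 : Int) + 1) (-|d.getD (pvArgmax d).2 0 + 1|, ((pvArgmax d).2 : Int) + 1, d.getD (pvArgmax d).2 0 + 1)).insert (((pvArgmax d).2 : Int) + 1 + 1) (-|((d.set (pvArgmax d).2 (d.getD (pvArgmax d).2 0 + 1)).getD ((pvArgmax d).2 + 1) 0 - 1)|, ((pvArgmax d).2 : Int) + 1 + 1, ((d.set (pvArgmax d).2 (d.getD (pvArgmax d).2 0 + 1)).getD ((pvArgmax d).2 + 1) 0 - 1))) ((d.set (pvArgmax d).2 (d.getD (pvArgmax d).2 0 + 1)).set ((pvArgmax d).2 + 1) ((d.set (pvArgmax d).2 (d.getD (pvArgmax d).2 0 + 1)).getD ((pvArgmax d).2 +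 1) 0 - 1)) q hwf2 hperm1 hd1
          rw [hh1]
          obtain ⟨hj1, hm1, hle1, hlt1⟩ := pvArgmax_spec ((d.set (pvArgmax d).2 (d.getD (pvArgmax d).2 0 + 1)).set ((pvArgmax d).2 + 1) ((d.set (pvArgmax d).2 (d.getD (pvArgmax d).2 0 + 1)).getD ((pvArgmax d).2 + 1) 0 - 1)) hd1
          have hval2 : (pvVal ((st.insert (((pvArgmax d).2 : Int) + 1) (-|d.getD (pvArgmax d).2 0 + 1|, ((pvArgmax d).2 : Int) + 1, d.getD (pvArgmax d).2 0 + 1)).insert (((pvArgmax d).2 : Int) + 1 + 1) (-|((d.set (pvArgmax d).2 (d.getD (pvArgmax d).2 0 + 1)).getD ((pvArgmax d).2 + 1) 0 - 1)|, ((pvArgmax d).2 : Int) + 1 + 1, ((d.set (pvArgmax d).2 (d.getD (pvArgmax d).2 0 + 1)).getD ((pvArgmax d).2 + 1) 0 - 1))) (((pvArgmax ((d.set (pvArgmax d).2 (d.getD (pvArgmax d).2 0 + 1)).set ((pvArgmax d).2 + 1) ((d.set (pvArgmax d).2 (d.getD (pvArgmax d).2 0 + 1)).getD ((pvArgmax d).2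 + 1) 0 - 1))).2 : Int) + 1)).1 = -|(((d.set (pvArgmax d).2 (d.getD (pvArgmax d).2 0 + 1)).set ((pvArgmax d).2 + 1) ((d.set (pvArgmax d).2 (d.getD (pvArgmax d).2 0 + 1)).getD ((pvArgmax d).2 + 1) 0 - 1))).getD (pvArgmax ((d.set (pvArgmax d).2 (d.getD (pvArgmax d).2 0 + 1)).set ((pvArgmax d).2 + 1) ((d.set (pvArgmax d).2 (d.getD (pvArgmax d).2 0 + 1)).getD ((pvArgmax d).2 + 1) 0 - 1))).2 0| := by
            rw [pvVal_of_wf _ _ hwf2 _ (by omega) (by rw [hlen1]; push_cast; omega)]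
            have e3 : (((pvArgmax ((d.set (pvArgmax d).2 (d.getD (pvArgmax d).2 0 + 1)).set ((pvArgmax d).2 + 1) ((d.set (pvArgmax d).2 (d.getD (pvArgmax d).2 0 + 1)).getD ((pvArgmax d).2 + 1) 0 - 1))).2 : Int) + 1 - 1).toNat = (pvArgmax ((d.set (pvArgmax d).2 (d.getD (pvArgmax d).2 0 + 1)).set ((pvArgmax d).2 + 1) ((d.set (pvArgmax d).2 (d.getD (pvArgmax d).2 0 + 1)).getD ((pvArgmax d).2 + 1) 0 - 1))).2 := by omega
            rw [e3]
          rw [hval2, neg_neg, neg_neg, ← hm, ← hm1]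
          by_cases hcmp2 : (pvArgmax d).1 < (pvArgmax ((d.set (pvArgmax d).2 (d.getD (pvArgmax d).2 0 + 1)).set ((pvArgmax d).2 + 1) ((d.set (pvArgmax d).2 (d.getD (pvArgmax d).2 0 + 1)).getD ((pvArgmax d).2 + 1) 0 - 1))).1
          · rw [if_pos hcmp2, if_pos hcmp2]
          · rw [if_neg hcmp2, if_neg hcmp2]
            exact ih ((st.insert (((pvArgmax d).2 : Int) + 1) (-|d.getD (pvArgmax d).2 0 + 1|, ((pvArgmax d).2 : Int) + 1, d.getD (pvArgmax d).2 0 + 1)).insert (((pvArgmax d).2 : Int) + 1 + 1) (-|((d.set (pvArgmax d).2 (d.getD (pvArgmax d).2 0 + 1)).getD ((pvArgmax d).2 + 1) 0 - 1)|, ((pvArgmax d).2 : Int) + 1 + 1, ((d.set (pvArgmax d).2 (d.getD (pvArgmax d).2 0 + 1)).getD ((pvArgmax d).2 + 1) 0 - 1))) (pvHeapify ((st.insert (((pvArgmax d).2 : Int) + 1) (-|d.getD (pvArgmax d).2 0 + 1|, ((pvArgmax d).2 : Int) + 1, d.getD (pvArgmax d).2 0 + 1)).insert (((pvArgmax d).2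 : Int) + 1 + 1) (-|((d.set (pvArgmax d).2 (d.getD (pvArgmax d).2 0 + 1)).getD ((pvArgmax d).2 + 1) 0 - 1)|, ((pvArgmax d).2 : Int) + 1 + 1, ((d.set (pvArgmax d).2 (d.getD (pvArgmax d).2 0 + 1)).getD ((pvArgmax d).2 + 1) 0 - 1))) q) ((d.set (pvArgmax d).2 (d.getD (pvArgmax d).2 0 + 1)).set ((pvArgmax d).2 + 1) ((d.set (pvArgmax d).2 (d.getD (pvArgmax d).2 0 + 1)).getD ((pvArgmax d).2 + 1) 0 - 1)) hwf2 hp1 hd1 hh1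
        · rw [if_neg (show ¬ (decide (1 ≤ ((pvArgmax d).2 : Int) + 1 + 1 ∧ ((pvArgmax d).2 : Int) + 1 + 1 ≤
              (((d.set (pvArgmax d).2 (d.getD (pvArgmax d).2 0 + 1)).length : Int))) = true) from by
              rw [decide_eq_true_eq, List.length_set]
              push_cast
              omega), if_neg hguard]
          have hwf2' : pvWF (st.insert (((pvArgmax d).2 : Int) + 1) (-|d.getD (pvArgmax d).2 0 + 1|, ((pvArgmax d).2 : Int) + 1, d.getD (pvArgmax d).2 0 + 1)) (d.set (pvArgmax d).2 (d.getD (pvArgmax d).2 0 + 1)) := hwf1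
          have hwf2 : pvWF (st.insert (((pvArgmax d).2 : Int) + 1) (-|d.getD (pvArgmax d).2 0 + 1|, ((pvArgmax d).2 : Int) + 1, d.getD (pvArgmax d).2 0 + 1)) (d.set (pvArgmax d).2 (d.getD (pvArgmax d).2 0 + 1)) := hwf2'
          have hlen1 : ((d.set (pvArgmax d).2 (d.getD (pvArgmax d).2 0 + 1))).length = d.length := by simp
          have hd1 : ((d.set (pvArgmax d).2 (d.getD (pvArgmax d).2 0 + 1))) ≠ [] := by
            intro hc
            have hcl : d.length = 0 := by rw [← hlen1, hc]; rfl
            omega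
          have hperm1 : q.Perm (PySem.List.pyRange 1 ((((d.set (pvArgmax d).2 (d.getD (pvArgmax d).2 0 + 1))).length : Int) + 1) 1) := by
            rw [hlen1]; exact hperm
          obtain ⟨hp1, hh1⟩ := pvHeapify_spec (st.insert (((pvArgmax d).2 : Int) + 1) (-|d.getD (pvArgmax d).2 0 + 1|, ((pvArgmax d).2 : Int) + 1, d.getD (pvArgmax d).2 0 + 1)) (d.set (pvArgmax d).2 (d.getD (pvArgmax d).2 0 + 1)) q hwf2 hperm1 hd1
          rw [hh1]
          obtain ⟨hj1, hm1, hle1, hlt1⟩ := pvArgmax_spec (d.set (pvArgmax d).2 (d.getD (pvArgmax d).2 0 + 1)) hd1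
          have hval2 : (pvVal (st.insert (((pvArgmax d).2 : Int) + 1) (-|d.getD (pvArgmax d).2 0 + 1|, ((pvArgmax d).2 : Int) + 1, d.getD (pvArgmax d).2 0 + 1)) (((pvArgmax (d.set (pvArgmax d).2 (d.getD (pvArgmax d).2 0 + 1))).2 : Int) + 1)).1 = -|((d.set (pvArgmax d).2 (d.getD (pvArgmax d).2 0 + 1))).getD (pvArgmax (d.set (pvArgmax d).2 (d.getD (pvArgmax d).2 0 + 1))).2 0| := by
            rw [pvVal_of_wf _ _ hwf2 _ (by omega) (by rw [hlen1]; push_cast; omega)]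
            have e3 : (((pvArgmax (d.set (pvArgmax d).2 (d.getD (pvArgmax d).2 0 + 1))).2 : Int) + 1 - 1).toNat = (pvArgmax (d.set (pvArgmax d).2 (d.getD (pvArgmax d).2 0 + 1))).2 := by omega
            rw [e3]
          rw [hval2, neg_neg, neg_neg, ← hm, ← hm1]
          by_cases hcmp2 : (pvArgmax d).1 < (pvArgmax (d.set (pvArgmax d).2 (d.getD (pvArgmax d).2 0 + 1))).1
          · rw [if_pos hcmp2, if_pos hcmp2]
          · rw [if_neg hcmp2, if_neg hcmp2]
            exact ih (st.insert (((pvArgmax d).2 : Int) + 1) (-|d.getD (pvArgmax d).2 0 + 1|, ((pvArgmax d).2 : Int) + 1, d.getD (pvArgmax d).2 0 + 1)) (pvHeapify (st.insert (((pvArgmax d).2 : Int) + 1) (-|d.getD (pvArgmax d).2 0 + 1|, ((pvArgmax d).2 : Int) + 1, d.getD (pvArgmax d).2 0 + 1)) q) (d.set (pvArgmax d).2 (d.getD (pvArgmax d).2 0 + 1)) hwf2 hp1 hd1 hh1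
      · rw [if_neg hpos, if_neg hneg, if_pos (show d.getD (pvArgmax d).2 0 = 0 by omega)]
        rw [neg_neg, show d.getD (pvArgmax d).2 0 = 0 by omega]
        simp

theorem pvInit_aux (nums : List Int) : ∀ (t : Nat), t + 1 ≤ nums.length →
    pvWF ((PySem.List.pyRange 1 (((t + 1 : Nat) : Int)) 1).foldl
        (fun s i =>
          let dv := PySem.List.pyGetD nums i 0 - PySem.List.pyGetD nums (i - 1) 0
          let st := s.1.insert i (-|dv|, i, dv)
          (st, pvHeappush st s.2 i))
        (PySem.Dict.empty, [])).1
      ((List.zipWith (fun a b => b - a) nums (nums.drop 1)).take t) ∧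
    ((PySem.List.pyRange 1 (((t + 1 : Nat) : Int)) 1).foldl
        (fun s i =>
          let dv := PySem.List.pyGetD nums i 0 - PySem.List.pyGetD nums (i - 1) 0
          let st := s.1.insert i (-|dv|, i, dv)
          (st, pvHeappush st s.2 i))
        (PySem.Dict.empty, [])).2.Perm (PySem.List.pyRange 1 ((t : Int) + 1) 1) ∧
    (1 ≤ t →
      ((PySem.List.pyRange 1 (((t + 1 : Nat) : Int)) 1).foldl
        (fun s i =>
          let dv := PySem.List.pyGetD nums i 0 - PySem.List.pyGetD nums (i - 1) 0
          let st := s.1.insert i (-|dv|, i, dv)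
          (st, pvHeappush st s.2 i))
        (PySem.Dict.empty, [])).2.headD 0 =
      ((pvArgmax ((List.zipWith (fun a b => b - a) nums (nums.drop 1)).take t)).2 : Int) + 1) := by
  intro t
  induction t with
  | zero =>
    intro _
    have hr : PySem.List.pyRange 1 (((0 + 1 : Nat) : Int)) 1 = [] :=
      PySem.List.pyRange_one_eq_nil (by norm_num)
    rw [hr]
    refine ⟨?_, by simp [hr, PySem.List.pyRange_one_eq_nil], by omega⟩
    intro i
    simp [PySem.Dict.get?_empty]
    omega
  | succ t ih =>
    intro hlen
    obtain ⟨hwf, hperm, _⟩ := ih (by omega)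
    have hdl : (List.zipWith (fun a b => b - a) nums (nums.drop 1)).length = nums.length - 1 := by
      simp
    have hc : (((t + 1 + 1 : Nat)) : Int) = ((t + 1 : Nat) : Int) + 1 := by push_cast; ring
    rw [hc, PySem.List.pyRange_one_succ_right (by push_cast; omega), List.foldl_append]
    simp only [List.foldl_cons, List.foldl_nil]
    set S := (PySem.List.pyRange 1 (((t + 1 : Nat) : Int)) 1).foldl
        (fun s i =>
          let dv := PySem.List.pyGetD nums i 0 - PySem.List.pyGetD nums (i - 1) 0
          let st := s.1.insert i (-|dv|, i, dv)
          (st, pvHeappush st s.2 i))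
        (PySem.Dict.empty, []) with hS
    have he : ((t + 1 : Nat) : Int) - 1 = ((t : Nat) : Int) := by push_cast; ring
    have hdv : PySem.List.pyGetD nums (((t + 1 : Nat) : Int)) 0 -
        PySem.List.pyGetD nums ((((t + 1 : Nat) : Int)) - 1) 0 =
        (List.zipWith (fun a b => b - a) nums (nums.drop 1)).getD t 0 := by
      rw [he, PySem.List.pyGetD_natCast, PySem.List.pyGetD_natCast,
        pvDiff_getD nums t (by omega)]
    rw [hdv]
    have htd : t < (List.zipWith (fun a b => b - a) nums (nums.drop 1)).length := by omega
    have hwf' : pvWF (S.1.insert (((t + 1 : Nat) : Int))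
        (-|(List.zipWith (fun a b => b - a) nums (nums.drop 1)).getD t 0|, ((t + 1 : Nat) : Int),
          (List.zipWith (fun a b => b - a) nums (nums.drop 1)).getD t 0))
        ((List.zipWith (fun a b => b - a) nums (nums.drop 1)).take (t + 1)) := by
      have h1 := pvWF_append' S.1 ((List.zipWith (fun a b => b - a) nums (nums.drop 1)).take t)
        hwf (((t + 1 : Nat) : Int)) ((List.zipWith (fun a b => b - a) nums (nums.drop 1)).getD t 0)
        (by simp only [List.length_take]; push_cast; omega)
      have h2 : (List.zipWith (fun a b => b - a) nums (nums.drop 1)).take t ++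
          [(List.zipWith (fun a b => b - a) nums (nums.drop 1)).getD t 0] =
          (List.zipWith (fun a b => b - a) nums (nums.drop 1)).take (t + 1) := by
        have hgd : (List.zipWith (fun a b => b - a) nums (nums.drop 1)).getD t 0 =
            (List.zipWith (fun a b => b - a) nums (nums.drop 1))[t] := by
          rw [List.getD_eq_getElem?_getD, List.getElem?_eq_getElem htd]; rfl
        rw [List.take_succ, List.getElem?_eq_getElem htd, hgd]; rfl
      rw [h2] at h1
      exact h1
    have hplen : ((List.zipWith (fun a b => b - a) nums (nums.drop 1)).take (t + 1)).length
        = t + 1 := by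
      simp only [List.length_take]
      omega
    have hne : (List.zipWith (fun a b => b - a) nums (nums.drop 1)).take (t + 1) ≠ [] := by
      intro hcon
      have := congrArg List.length hcon
      rw [hplen] at this
      simp at this
    have hpermq : (S.2 ++ [((t + 1 : Nat) : Int)]).Perm
        (PySem.List.pyRange 1
          ((((List.zipWith (fun a b => b - a) nums (nums.drop 1)).take (t + 1)).length : Int) + 1)
          1) := by
      rw [hplen]
      have hsr : PySem.List.pyRange 1 (((t + 1 : Nat) : Int) + 1) 1 =
          PySem.List.pyRange 1 (((t + 1 : Nat) : Int)) 1 ++ [((t + 1 : Nat) : Int)] :=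
        PySem.List.pyRange_one_succ_right (by push_cast; omega)
      have : PySem.List.pyRange 1 (((t + 1 : Nat) : Int)) 1 =
          PySem.List.pyRange 1 ((t : Int) + 1) 1 := by push_cast; rfl
      rw [show (((t + 1 : Nat) : Int) + 1) = ((t + 1 : Nat) : Int) + 1 from rfl, hsr, this]
      exact hperm.append_right [((t + 1 : Nat) : Int)]
    obtain ⟨hp1, hh1⟩ := pvHeapify_spec _ _ _ hwf' hpermq hne
    refine ⟨hwf', ?_, fun _ => ?_⟩
    · have hlen2 : ((((List.zipWith (fun a b => b - a) nums (nums.drop 1)).take (t + 1)).length : Int) + 1)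
          = (((t + 1 : Nat) : Int) + 1) := by rw [hplen]
      simp only [pvHeappush]
      rw [show PySem.List.pyRange 1 (((t + 1 : Nat) : Int)) 1 ++ [((t + 1 : Nat) : Int)] =
          PySem.List.pyRange 1 ((((t + 1 : Nat) : Int)) + 1) 1 from
        (PySem.List.pyRange_one_succ_right (by push_cast; omega)).symm]
      rw [← hlen2]
      exact hp1
    · simp only [pvHeappush]
      exact hh1

theorem pvInit_spec (nums : List Int) (hn : 2 ≤ nums.length) :
    pvWF (pvInitA nums).1 (List.zipWith (fun a b => b - a) nums (nums.drop 1)) ∧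
      (pvInitA nums).2.Perm (PySem.List.pyRange 1
        (((List.zipWith (fun a b => b - a) nums (nums.drop 1)).length : Int) + 1) 1) ∧
      (pvInitA nums).2.headD 0 =
        ((pvArgmax (List.zipWith (fun a b => b - a) nums (nums.drop 1))).2 : Int) + 1 := by
  obtain ⟨h1, h2, h3⟩ := pvInit_aux nums (nums.length - 1) (by omega)
  have hdl : (List.zipWith (fun a b => b - a) nums (nums.drop 1)).length = nums.length - 1 := by
    simp
  have e : (nums.length - 1 + 1 : Nat) = nums.length := by omega
  rw [e] at h1 h2 h3
  have ht : (List.zipWith (fun a b => b - a) nums (nums.drop 1)).take (nums.length - 1) =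
      List.zipWith (fun a b => b - a) nums (nums.drop 1) := by
    apply List.take_of_length_le
    omega
  rw [ht] at h1 h3
  refine ⟨h1, ?_, h3 (by omega)⟩
  rw [show ((((List.zipWith (fun a b => b - a) nums (nums.drop 1)).length) : Int)) =
      (((nums.length - 1 : Nat)) : Int) from by rw [hdl]]
  exact h2

-- ===== VERDICT (by name: the statement is the Claim_ definition above) =====
theorem onegroup_spec : Claim_equal_onegroup := by
  intro nums k _hdom hpre
  unfold Spec_onegroup onegroup onegroup_alt
  have hn : 2 ≤ nums.length := hpre
  obtain ⟨hwf, hperm, hhead⟩ := pvInit_spec nums hn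
  have hdlen : (List.zipWith (fun a b => b - a) nums (nums.drop 1)).length = nums.length - 1 := by
    simp
  have hd : List.zipWith (fun a b => b - a) nums (nums.drop 1) ≠ [] := by
    intro hcon
    rw [hcon] at hdlen
    simp at hdlen
    omega
  exact pvLoop_eq k.toNat (pvInitA nums).1 (pvInitA nums).2 _ hwf hperm hd hhead
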